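-- pv_equiv track=rewrite | github.com/nbermingham/backtracking | eight_queens.py | solve_nq_til
-- ===== SOURCE A (Python) =====
-- from typing import List
--
-- def is_safe(board: List[List[int]], row: int, col: int) -> bool:
--     """
--     check the row, column and diagonals to see if another queen is there
--     """
--
--     n = len(board)
--
--     #checks the row
--     for i in range(col):
--         if board[row][i]:
--             return False
--
--     #checks upper diagonal on the left side
--     for i, j in zip(range(row, -1, -1), range(col, -1, -1)):
--         if board[i][j]:
--             return False
--
--     #checks lower diagonal on the left side
--     for i, j in zip(range(row, n, 1), range(col, n, 1)):
--         if board[i][j]: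
--             return False
--
--     return True
--
-- def solve_nq_til(board, col) -> bool:
--     """
--     solves
--     """
--
--     #base case: we've already placed all the queens
--     if col >= N:
--         return True
--
--     for i in range(N):
--         if is_safe(board, i, col):
--             board[i][col] = 1
--             if solve_nq_til(board, col + 1):
--                 return True
--
--             board[i][col] = 0
--
--     return False
--
-- N = 8
-- ===== SOURCE B (Python) =====
-- # Iterative backtracking (explicit column-pointer stack) instead of A's recursion.
-- # Same is_safe test and row-scan order; mutates board the same way A does
-- # (queens left in place on success, board restored on failure).
--
-- N = 8
--
-- def is_safe(board, row, col):
--     n = len(board)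
--     for i in range(col):
--         if board[row][i]:
--             return False
--     for i, j in zip(range(row, -1, -1), range(col, -1, -1)):
--         if board[i][j]:
--             return False
--     for i, j in zip(range(row, n, 1), range(col, n, 1)):
--         if board[i][j]:
--             return False
--     return True
--
-- def solve_nq_til(board, col):
--     if col >= N:
--         return True
--     stack = []          # stack[k] = row of the queen placed k columns back
--     c, i = col, 0       # i = next row to try in column c
--     while True:
--         while i < N and not is_safe(board, i, c):
--             i += 1
--         if i < N:                       # place a queen and advance
--             board[i][c] = 1
--             stack.append(i)
--             c, i = c + 1, 0
--             if c >= N: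
--                 return True
--         else:                           # no row left: backtrack
--             if not stack:
--                 return False
--             c -= 1
--             i = stack.pop()
--             board[i][c] = 0
--             i += 1
-- ===== Notes on version B (the rewrite author's own statement) =====
-- stated objective: alternative
-- what changed: A's recursive backtracking over columns is replaced by an explicit iterative while-loop with a stack of placed rows (iterative vs recursive decomposition; same is_safe test, same row-scan order, same board mutations).
import Mathlib
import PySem

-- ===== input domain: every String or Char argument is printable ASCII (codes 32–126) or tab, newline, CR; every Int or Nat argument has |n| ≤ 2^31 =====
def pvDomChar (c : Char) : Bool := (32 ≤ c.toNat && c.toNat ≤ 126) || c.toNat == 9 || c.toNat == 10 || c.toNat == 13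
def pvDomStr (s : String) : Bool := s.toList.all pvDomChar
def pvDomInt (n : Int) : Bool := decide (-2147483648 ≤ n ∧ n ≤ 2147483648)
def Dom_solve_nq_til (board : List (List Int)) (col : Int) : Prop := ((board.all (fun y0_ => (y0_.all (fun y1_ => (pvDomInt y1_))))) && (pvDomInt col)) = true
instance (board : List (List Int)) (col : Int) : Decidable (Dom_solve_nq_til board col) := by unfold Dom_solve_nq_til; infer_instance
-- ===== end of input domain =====

-- B replaces A's recursive backtracking by an explicit iterative while-loop with a stack of
-- placed rows (objective: alternative decomposition, same is_safe test, same row-scan order,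
-- same board mutations). Both Pythons mutate `board` identically; the equivalence proved
-- here is about the RETURN value.

-- ===== PORT A =====

-- board[r][c] read; Python raises IndexError out of range, this helper returns 0 there
-- (unreachable inside Pre_, where every access is in range)
def getCell (b : List (List Int)) (r c : Int) : Int :=
  match PySem.List.pyGet? b r with
  | some row => (PySem.List.pyGet? row c).getD 0
  | none => 0

-- board[r][c] = v; indices are in range (and nonnegative) inside Pre_
def setCell (b : List (List Int)) (r c : Int) (v : Int) : List (List Int) :=
  b.set r.toNat ((b.getD r.toNat []).set c.toNat v)

-- literal port of is_safe (early-return loops become List.any over the same ranges)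
def is_safe (b : List (List Int)) (row col : Int) : Bool :=
  let n : Int := (b.length : Int)
  if (PySem.List.pyRange 0 col 1).any (fun i => getCell b row i ≠ 0) then false
  else if ((PySem.List.pyRange row (-1) (-1)).zip (PySem.List.pyRange col (-1) (-1))).any
      (fun p => getCell b p.1 p.2 ≠ 0) then false
  else if ((PySem.List.pyRange row n 1).zip (PySem.List.pyRange col n 1)).any
      (fun p => getCell b p.1 p.2 ≠ 0) then false
  else true

-- A's `for i in range(N)` body: structural recursion on the list of remaining rows;
-- `next` is the recursive call `solve_nq_til(board, col+1)`.  Board mutation is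
-- threaded as state.
def tryRowsA (next : List (List Int) → Bool × List (List Int)) (col : Int) :
    List (List Int) → List Int → Bool × List (List Int)
  | b, [] => (false, b)
  | b, i :: rest =>
    if is_safe b i col then
      let b1 := setCell b i col 1
      let res := next b1
      if res.1 then (true, res.2)
      else tryRowsA next col (setCell res.2 i col 0) rest
    else tryRowsA next col b rest

-- A's recursion over columns; the Nat argument is (8 - col).toNat, a counter that makes
-- the recursion structural (it mirrors `col` exactly: 0 ↔ col ≥ N, the base case)
def solveColsA : Nat → Int → List (List Int) → Bool × List (List Int)
  | 0, _, b => (true, b)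
  | n + 1, col, b =>
    if 8 ≤ col then (true, b)
    else tryRowsA (solveColsA n (col + 1)) col b (PySem.List.pyRange 0 8 1)

def solve_nq_til (board : List (List Int)) (col : Int) : Bool :=
  if 8 ≤ col then true else (solveColsA (8 - col).toNat col board).1

-- ===== PORT B =====

-- inner `while i < N and not is_safe(...)` of Source B: the Nat counter (8 - i).toNat makes
-- the scan structural; scanB returns the final value of i
def scanGo : Nat → List (List Int) → Int → Int → Int
  | 0, _, _, i => i
  | n + 1, b, c, i => if i < 8 ∧ is_safe b i c = false then scanGo n b c (i + 1) else i

def scanB (b : List (List Int)) (c i : Int) : Int := scanGo (8 - i).toNat b c i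

-- fuel bound for B's outer while-loop: size of the remaining search tree
-- (nqM c i s strictly decreases at every iteration; see nqM_push / nqM_pop below)
def nqF : Nat → Nat
  | 0 => 1
  | n + 1 => 8 * nqF n + 2

def nqE (c : Int) : Nat := nqF ((8 - c).toNat)

def nqR (c i : Int) : Nat := (8 - i).toNat * nqE (c + 1)

def nqStackM : Int → List Int → Nat
  | _, [] => 0
  | c, j :: s => nqR (c - 1) (j + 1) + nqStackM (c - 1) s + 1

def nqM (c i : Int) (s : List Int) : Nat := nqR c i + nqStackM c s

-- outer `while True` of Source B: c = current column, i = next row to try, s = stack of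
-- placed rows; the Nat fuel only totalizes the loop (provably never exhausted)
def loopGo : Nat → List (List Int) → Int → Int → List Int → Bool
  | 0, _, _, _, _ => false
  | f + 1, b, c, i, s =>
    let r := scanB b c i
    if r < 8 then
      let b' := setCell b r c 1
      if 8 ≤ c + 1 then true
      else loopGo f b' (c + 1) 0 (r :: s)
    else
      match s with
      | [] => false
      | j :: s' => loopGo f (setCell b j (c - 1) 0) (c - 1) (j + 1) s'

def solve_nq_til_alt (board : List (List Int)) (col : Int) : Bool :=
  if 8 ≤ col then true else loopGo (nqM col 0 [] + 1) board col 0 []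

-- ===== PRECONDITION & SPEC =====
-- Pre_ restricts to the natural domain of the module's global N = 8: an 8×8 board and a
-- nonnegative column (or col ≥ 8, where A returns True for any board).  Outside it A
-- either raises IndexError (boards smaller than 8×8, col ≤ -9) or its value is an
-- artefact of negative-index wraparound / of scanning only an 8×8 corner of a larger
-- board.
def Pre_solve_nq_til (board : List (List Int)) (col : Int) : Prop :=
  8 ≤ col ∨ (0 ≤ col ∧ board.length = 8 ∧ ∀ r ∈ board, r.length = 8)
instance (board : List (List Int)) (col : Int) : Decidable (Pre_solve_nq_til board col) := by
  unfold Pre_solve_nq_til; infer_instance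

def pvWitness_solve_nq_til : List (List Int) × Int := (List.replicate 8 (List.replicate 8 0), 0)

def Spec_solve_nq_til (board : List (List Int)) (col : Int) (out : Bool) : Prop := out = solve_nq_til_alt board col
instance (board : List (List Int)) (col : Int) (out : Bool) : Decidable (Spec_solve_nq_til board col out) := by unfold Spec_solve_nq_til; infer_instance

-- ===== CLAIM (what is proved, stated in full; the proofs are below) =====
def Claim_equal_solve_nq_til : Prop := ∀ (board : List (List Int)) (col : Int), Dom_solve_nq_til board col → Pre_solve_nq_til board col → Spec_solve_nq_til board col (solve_nq_til board col)

-- ===== LEMMAS AND PROOFS =====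

-- A's row scan at column c starting from row i, with the exact continuation fuel
def tryFromA (b : List (List Int)) (c i : Int) : Bool × List (List Int) :=
  tryRowsA (solveColsA (7 - c).toNat (c + 1)) c b (PySem.List.pyRange i 8 1)

-- what A's pending loop frames do after an inner failure: stack s holds the rows of the
-- queens placed in columns c-1, c-2, …
def unwindA : List (List Int) → Int → List Int → Bool
  | _, _, [] => false
  | b, c, j :: s' =>
    let res := tryFromA (setCell b j (c - 1) 0) (c - 1) (j + 1)
    if res.1 then true else unwindA res.2 (c - 1) s'

theorem nqStackM_cons (c j : Int) (s : List Int) :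
    nqStackM c (j :: s) = nqR (c - 1) (j + 1) + nqStackM (c - 1) s + 1 := rfl

theorem nqM_push (c i r : Int) (s : List Int) (hir : i ≤ r) (hr : r < 8) (hc : c + 1 < 8) :
    nqM (c + 1) 0 (r :: s) < nqM c i s := by
  unfold nqM
  rw [nqStackM_cons, show c + 1 - 1 = c from by ring]
  have key : nqR (c + 1) 0 + nqR c (r + 1) + 1 < nqR c i := by
    have e2 : nqE (c + 1) = 8 * nqF ((6 - c).toNat) + 2 := by
      unfold nqE
      have h : (8 - (c + 1)).toNat = (6 - c).toNat + 1 := by omega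
      rw [h, nqF]
    have e1 : nqE (c + 1 + 1) = nqF ((6 - c).toNat) := by
      unfold nqE; congr 1; omega
    unfold nqR
    rw [e1, e2, show ((8 : Int) - 0).toNat = 8 from by omega]
    have hmul : ((8 - (r + 1)).toNat + 1) * (8 * nqF ((6 - c).toNat) + 2) ≤
        (8 - i).toNat * (8 * nqF ((6 - c).toNat) + 2) :=
      Nat.mul_le_mul_right _ (by omega)
    have hexp : ((8 - (r + 1)).toNat + 1) * (8 * nqF ((6 - c).toNat) + 2) =
        (8 - (r + 1)).toNat * (8 * nqF ((6 - c).toNat) + 2) + 8 * nqF ((6 - c).toNat) + 2 := by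
      ring
    rw [hexp] at hmul
    omega
  omega

theorem nqM_pop (c i j : Int) (s : List Int) : nqM (c - 1) (j + 1) s < nqM c i (j :: s) := by
  unfold nqM
  rw [nqStackM_cons]
  omega

-- one-step unfolding of scanB, independent of the fuel encoding
theorem scanB_eq (b : List (List Int)) (c i : Int) :
    scanB b c i = if i < 8 ∧ is_safe b i c = false then scanB b c (i + 1) else i := by
  unfold scanB
  by_cases hi : i < 8
  · have h8 : (8 - i).toNat = (8 - (i + 1)).toNat + 1 := by omega
    rw [h8, scanGo]
  · have h0 : (8 - i).toNat = 0 := by omega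
    rw [h0, scanGo]
    simp
    omega

theorem scanGo_ge (n : Nat) (b : List (List Int)) (c i : Int) : i ≤ scanGo n b c i := by
  induction n generalizing i with
  | zero => exact le_refl i
  | succ n ih =>
    rw [scanGo]
    split
    · exact le_trans (by omega) (ih (i + 1))
    · exact le_refl i

theorem scanB_ge (b : List (List Int)) (c i : Int) : i ≤ scanB b c i := scanGo_ge _ b c i

-- solveColsA with its exact fuel, phrased over col
theorem solveColsA_eq (c : Int) (b : List (List Int)) :
    solveColsA (8 - c).toNat c b = if 8 ≤ c then (true, b) else tryFromA b c 0 := by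
  by_cases h : 8 ≤ c
  · have h0 : (8 - c).toNat = 0 := by omega
    rw [h0, solveColsA, if_pos h]
  · have h1 : (8 - c).toNat = (7 - c).toNat + 1 := by omega
    rw [h1, solveColsA]
    simp only [if_neg h]
    rfl

-- tryFromA in scan-normal-form: skip unsafe rows first (scanB), then act on the first
-- safe one
theorem tryFromA_scan (b : List (List Int)) (c i : Int) :
    tryFromA b c i =
      if scanB b c i < 8 then
        let r := scanB b c i
        let b1 := setCell b r c 1
        let res := if 8 ≤ c + 1 then (true, b1) else tryFromA b1 (c + 1) 0
        if res.1 then (true, res.2) else tryFromA (setCell res.2 r c 0) c (r + 1)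
      else (false, b) := by
  by_cases h8 : 8 ≤ i
  · have hs : scanB b c i = i := by
      rw [scanB_eq]
      simp
      omega
    have hnil : PySem.List.pyRange i 8 1 = [] := PySem.List.pyRange_one_eq_nil (by omega)
    rw [hs, if_neg (show ¬ i < 8 by omega)]
    conv_lhs => rw [tryFromA]
    rw [hnil, tryRowsA]
  · have hcons : PySem.List.pyRange i 8 1 = i :: PySem.List.pyRange (i + 1) 8 1 :=
      PySem.List.pyRange_one_cons (by omega)
    by_cases hsafe : is_safe b i c = true
    · have hs : scanB b c i = i := by rw [scanB_eq]; simp [hsafe]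
      have hnext : solveColsA (7 - c).toNat (c + 1) (setCell b i c 1) =
          if 8 ≤ c + 1 then (true, setCell b i c 1) else tryFromA (setCell b i c 1) (c + 1) 0 := by
        have h7 : (7 - c).toNat = (8 - (c + 1)).toNat := by omega
        rw [h7, solveColsA_eq]
      have hl : tryFromA b c i =
          (if (solveColsA (7 - c).toNat (c + 1) (setCell b i c 1)).1 then
            (true, (solveColsA (7 - c).toNat (c + 1) (setCell b i c 1)).2)
          else
            tryRowsA (solveColsA (7 - c).toNat (c + 1)) c
              (setCell (solveColsA (7 - c).toNat (c + 1) (setCell b i c 1)).2 i c 0)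
              (PySem.List.pyRange (i + 1) 8 1)) := by
        conv_lhs => rw [tryFromA]
        rw [hcons, tryRowsA, if_pos hsafe]
      rw [hl, hnext, hs, if_pos (show i < 8 by omega)]
      rfl
    · have hsf : is_safe b i c = false := by simpa using hsafe
      have hstep : scanB b c i = scanB b c (i + 1) := by
        rw [scanB_eq]
        simp [hsf, show i < 8 by omega]
      have htr : tryFromA b c i = tryFromA b c (i + 1) := by
        conv_lhs => rw [tryFromA]
        rw [hcons, tryRowsA, if_neg (by simp [hsf])]
        rfl
      rw [htr, hstep]
      exact tryFromA_scan b c (i + 1)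
termination_by (8 - i).toNat
decreasing_by omega

-- the loop started at (c, i) with stack s computes: run A's row scan at (c, i); on
-- success True, on failure resume the pending frames (unwindA)
theorem loopGo_eq (f : Nat) (b : List (List Int)) (c i : Int) (s : List Int)
    (hf : nqM c i s < f) :
    loopGo f b c i s =
      (if (tryFromA b c i).1 then true else unwindA (tryFromA b c i).2 c s) := by
  induction f generalizing b c i s with
  | zero => omega
  | succ f ih =>
    rw [loopGo.eq_def, tryFromA_scan]
    by_cases hr : scanB b c i < 8
    · simp only [hr, if_true]
      by_cases hc : 8 ≤ c + 1
      · simp [hc]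
      · simp only [hc, if_false]
        have hlt : nqM (c + 1) 0 (scanB b c i :: s) < f :=
          lt_of_lt_of_le (nqM_push c i (scanB b c i) s (scanB_ge b c i) hr (by omega))
            (by omega)
        rw [ih _ _ _ _ hlt]
        by_cases hok : (tryFromA (setCell b (scanB b c i) c 1) (c + 1) 0).1 = true
        · simp [hok]
        · have hokf : (tryFromA (setCell b (scanB b c i) c 1) (c + 1) 0).1 = false := by
            simpa using hok
          simp only [hokf, Bool.false_eq_true, if_false]
          rw [unwindA]
          simp only [show c + 1 - 1 = c from by ring]
    · simp only [hr, if_false]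
      cases s with
      | nil => simp [unwindA]
      | cons j s' =>
        have hlt : nqM (c - 1) (j + 1) s' < f :=
          lt_of_lt_of_le (nqM_pop c i j s') (by omega)
        show loopGo f (setCell b j (c - 1) 0) (c - 1) (j + 1) s' = _
        rw [ih _ _ _ _ hlt]
        rw [unwindA]
        simp

-- ===== VERDICT (by name: the statement is the Claim_ definition above) =====
theorem solve_nq_til_spec : Claim_equal_solve_nq_til := by
  intro board col _ _
  unfold Spec_solve_nq_til solve_nq_til solve_nq_til_alt
  by_cases h : 8 ≤ col
  · simp [h]
  · simp only [h, if_false]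
    rw [loopGo_eq _ _ _ _ _ (Nat.lt_succ_self _)]
    have hcols : solveColsA (8 - col).toNat col board = tryFromA board col 0 := by
      rw [solveColsA_eq, if_neg h]
    rw [hcols]
    by_cases hok : (tryFromA board col 0).1 = true
    · simp [hok]
    · have hokf : (tryFromA board col 0).1 = false := by simpa using hok
      simp [hokf, unwindA]
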